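-- pv_equiv track=rewrite | github.com/C-X1an/driftline | core/vision/merger.py | merge_vision_sections
-- ===== SOURCE A (Python) =====
-- def merge_vision_sections(original: str, sections: dict) -> str:
--     core_md = sections.get("core_capabilities_markdown", "").strip()
--     guarantees_md = sections.get("guarantees_markdown", "").strip()
--
--     lines = original.splitlines(keepends=True)
--
--     def find_section_bounds(header: str):
--         start = None
--         end = None
--
--         for i, line in enumerate(lines):
--             if line.strip() == f"## {header}":
--                 start = i
--                 break
--
--         if start is None:
--             return None, None
--
--         for j in range(start + 1, len(lines)):
--             stripped = lines[j].strip()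
--             if stripped.startswith("## ") or stripped == "---":
--                 end = j
--                 break
--
--         if end is None:
--             end = len(lines)
--
--         return start, end
--
--     def replace_section(header: str, new_body: str):
--         start, end = find_section_bounds(header)
--         if start is None:
--             return
--
--         new_section = [f"## {header}\n", "\n"]
--
--         if new_body:
--             new_section.append(new_body.strip() + "\n")
--
--         new_section.append("\n")
--
--         lines[start:end] = new_section
--
--     replace_section("Core Capabilities", core_md)
--     replace_section("Guarantees", guarantees_md)
--
--     return "".join(lines)
-- ===== SOURCE B (Python) =====
-- def merge_vision_sections(original: str, sections: dict) -> str: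
--     core_md = sections.get("core_capabilities_markdown", "").strip()
--     guarantees_md = sections.get("guarantees_markdown", "").strip()
--
--     out = []
--     core_done = False
--     guar_done = False
--     skipping = False
--     for line in original.splitlines(keepends=True):
--         s = line.strip()
--         if skipping:
--             if s.startswith("## ") or s == "---":
--                 skipping = False
--             else:
--                 continue
--         if s == "## Core Capabilities" and not core_done:
--             core_done = True
--             body = core_md
--         elif s == "## Guarantees" and not guar_done:
--             guar_done = True
--             body = guarantees_md
--         else:
--             out.append(line)
--             continue
--         out.append(s + "\n")
--         out.append("\n")
--         if body:
--             out.append(body + "\n")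
--         out.append("\n")
--         skipping = True
--     return "".join(out)
-- ===== Notes on version B (the rewrite author's own statement) =====
-- stated objective: alternative
-- what changed: Replaces A's two locate-and-splice passes (each re-scanning and mutating the whole line list) with a single pass over the lines driven by a (core_done, guar_done, skipping) state machine that emits the replacement blocks in place.
import Mathlib
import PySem

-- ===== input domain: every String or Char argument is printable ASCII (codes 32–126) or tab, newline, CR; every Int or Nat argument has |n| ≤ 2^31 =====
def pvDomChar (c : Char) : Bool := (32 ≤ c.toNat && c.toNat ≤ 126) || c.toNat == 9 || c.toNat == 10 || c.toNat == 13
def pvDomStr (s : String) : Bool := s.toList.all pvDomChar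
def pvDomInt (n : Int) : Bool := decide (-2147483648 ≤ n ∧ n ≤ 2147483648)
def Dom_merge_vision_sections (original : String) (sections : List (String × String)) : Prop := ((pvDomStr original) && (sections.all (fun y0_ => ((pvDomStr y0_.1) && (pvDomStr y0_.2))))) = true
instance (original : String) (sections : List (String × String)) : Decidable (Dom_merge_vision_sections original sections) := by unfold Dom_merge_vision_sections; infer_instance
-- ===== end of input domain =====

-- B replaces A's two locate-and-splice passes (each re-scanning and mutating the
-- line list) by a single-pass state machine over the lines; objective: alternative
-- decomposition. Pre_ below excludes the inputs on which A's second pass re-matches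
-- the body text its own first pass inserted (see the comment at Pre_); B matches
-- only the original document's lines there.


-- shared primitive: str.splitlines(keepends=True), hand-ported (PySem.Chars.splitlines
-- drops the line ends); exact on the domain's line boundaries '\n', '\r\n', '\r'
def pvLinesAux (acc : List Char) : List Char → List (List Char)
  | [] => if acc.isEmpty then [] else [acc.reverse]
  | '\n' :: t => (acc.reverse ++ ['\n']) :: pvLinesAux [] t
  | '\r' :: '\n' :: t => (acc.reverse ++ ['\r', '\n']) :: pvLinesAux [] t
  | '\r' :: t => (acc.reverse ++ ['\r']) :: pvLinesAux [] t
  | c :: t => pvLinesAux (c :: acc) t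

def pvLines (cs : List Char) : List (List Char) := pvLinesAux [] cs

-- ===== PORT A =====
-- for i, line in enumerate(lines): if line.strip() == f"## {header}": start = i; break
def pvFindStartA (target : List Char) : List (List Char) → Option Nat
  | [] => none
  | l :: t =>
    if PySem.Chars.strip l = target then some 0
    else (pvFindStartA target t).map (· + 1)

-- for j in range(start+1, len(lines)): if stripped.startswith("## ") or stripped == "---": end = j; break
def pvFindBoundA : List (List Char) → Option Nat
  | [] => none
  | l :: t =>
    if PySem.Chars.startswith (PySem.Chars.strip l) "## ".toList
        || PySem.Chars.strip l = "---".toList then some 0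
    else (pvFindBoundA t).map (· + 1)

-- new_section = [f"## {header}\n", "\n"] (+ [new_body.strip() + "\n"]) + ["\n"]
def pvNewSecA (header body : List Char) : List (List Char) :=
  ["## ".toList ++ header ++ ['\n'], ['\n']]
    ++ (if body.isEmpty then [] else [PySem.Chars.strip body ++ ['\n']])
    ++ [['\n']]

-- replace_section: find bounds, then lines[start:end] = new_section
def pvReplaceSectionA (header body : List Char) (lines : List (List Char)) : List (List Char) :=
  match pvFindStartA ("## ".toList ++ header) lines with
  | none => lines
  | some s =>
    let e : Nat :=
      match pvFindBoundA (lines.drop (s + 1)) with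
      | some k => s + 1 + k
      | none => lines.length
    lines.take s ++ pvNewSecA header body ++ lines.drop e

def merge_vision_sections (original : String) (sections : List (String × String)) : String :=
  let core_md := PySem.Chars.strip (PySem.Dict.getD ⟨sections⟩ "core_capabilities_markdown" "").toList
  let guarantees_md := PySem.Chars.strip (PySem.Dict.getD ⟨sections⟩ "guarantees_markdown" "").toList
  let lines := pvLines original.toList
  let lines := pvReplaceSectionA "Core Capabilities".toList core_md lines
  let lines := pvReplaceSectionA "Guarantees".toList guarantees_md lines
  String.ofList (PySem.Chars.join [] lines)

-- ===== PORT B =====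
-- out.append(s + "\n"); out.append("\n"); if body: out.append(body + "\n"); out.append("\n")
def pvSecB (s body : List Char) : List (List Char) :=
  [s ++ ['\n'], ['\n']] ++ (if body.isEmpty then [] else [body ++ ['\n']]) ++ [['\n']]

-- the single-pass state machine: state = (core_done, guar_done, skipping)
def pvGoB (core guar : List Char) : List (List Char) → Bool → Bool → Bool → List (List Char)
  | [], _, _, _ => []
  | l :: t, cd, gd, sk =>
    let s := PySem.Chars.strip l
    if sk && !(PySem.Chars.startswith s "## ".toList || s = "---".toList) then
      pvGoB core guar t cd gd true
    else
      if s = "## Core Capabilities".toList && !cd then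
        pvSecB s core ++ pvGoB core guar t true gd true
      else if s = "## Guarantees".toList && !gd then
        pvSecB s guar ++ pvGoB core guar t cd true true
      else
        l :: pvGoB core guar t cd gd false

def merge_vision_sections_alt (original : String) (sections : List (String × String)) : String :=
  let core_md := PySem.Chars.strip (PySem.Dict.getD ⟨sections⟩ "core_capabilities_markdown" "").toList
  let guarantees_md := PySem.Chars.strip (PySem.Dict.getD ⟨sections⟩ "guarantees_markdown" "").toList
  String.ofList (PySem.Chars.join [] (pvGoB core_md guarantees_md (pvLines original.toList) false false false))

-- ===== PRECONDITION & SPEC =====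
-- input inspection for Pre_: does some line of the text strip to '## Core Capabilities'?
-- (a presence scan over the characters; boundary chars checked per line, terminators
-- never reach the stripped candidate, so '\r\n' needs no special pairing)
def pvHasCoreHdr (cur : List Char) : List Char → Bool
  | [] => decide (PySem.Chars.strip cur.reverse = "## Core Capabilities".toList)
  | c :: t =>
    if c = '\n' ∨ c = '\r' then
      decide (PySem.Chars.strip cur.reverse = "## Core Capabilities".toList) || pvHasCoreHdr [] t
    else pvHasCoreHdr (c :: cur) t

-- Pre_ excludes the inputs whose core_capabilities_markdown value strips to exactly
-- '## Guarantees' while the document contains a '## Core Capabilities' header line: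
-- there A's second locate-and-splice pass runs over the list its first pass mutated
-- and can re-match the body line that first pass just inserted, an artefact of the
-- in-place mutation that B's pass over the original document's lines does not share.
def Pre_merge_vision_sections (original : String) (sections : List (String × String)) : Prop :=
  ¬ ((sections.find? (fun p => p.1 == "core_capabilities_markdown")).any
        (fun p => PySem.Str.strip p.2 == "## Guarantees") = true
      ∧ pvHasCoreHdr [] original.toList = true)

instance (original : String) (sections : List (String × String)) : Decidable (Pre_merge_vision_sections original sections) := by
  unfold Pre_merge_vision_sections; infer_instance

def pvWitness_merge_vision_sections : String × (List (String × String)) :=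
  ("# Title\n## Core Capabilities\nold\n---\n## Guarantees\nold\n", [("core_capabilities_markdown", "* a"), ("guarantees_markdown", "* b")])

def Spec_merge_vision_sections (original : String) (sections : List (String × String)) (out : String) : Prop :=
  out = merge_vision_sections_alt original sections
instance (original : String) (sections : List (String × String)) (out : String) : Decidable (Spec_merge_vision_sections original sections out) := by unfold Spec_merge_vision_sections; infer_instance

-- ===== CLAIM (what is proved, stated in full; the proofs are below) =====
def Claim_equal_merge_vision_sections : Prop := ∀ (original : String) (sections : List (String × String)), Dom_merge_vision_sections original sections → Pre_merge_vision_sections original sections → Spec_merge_vision_sections original sections (merge_vision_sections original sections)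

-- ===== LEMMAS AND PROOFS =====

-- proof-layer helpers
abbrev pvIsB (l : List Char) : Bool :=
  PySem.Chars.startswith (PySem.Chars.strip l) "## ".toList || PySem.Chars.strip l = "---".toList
-- drop-to-boundary: the suffix of the lines from the first boundary line on (or [])
def pvDtb (xs : List (List Char)) : List (List Char) :=
  match pvFindBoundA xs with
  | some k => xs.drop k
  | none => []

theorem pv_drop_pref {p : Char → Bool} {l₁ l₂ : List Char} (hp : l₁ <+: l₂)
    (h : List.dropWhile p l₂ = l₂) : List.dropWhile p l₁ = l₁ := by
  rw [List.dropWhile_eq_self_iff] at h ⊢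
  intro hl
  have hl2 : 0 < l₂.length := lt_of_lt_of_le hl hp.length_le
  have := hp.getElem (i := 0) hl
  rw [this]
  exact h hl2

theorem pv_strip_idem (s : List Char) :
    PySem.Chars.strip (PySem.Chars.strip s) = PySem.Chars.strip s := by
  have h1 : List.dropWhile PySem.Chars.isspace (PySem.Chars.strip s) = PySem.Chars.strip s := by
    apply pv_drop_pref (l₂ := List.dropWhile PySem.Chars.isspace s)
    · have hs := List.dropWhile_suffix (l := (List.dropWhile PySem.Chars.isspace s).reverse)
        (p := PySem.Chars.isspace)
      rw [← List.reverse_prefix] at hs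
      simpa [PySem.Chars.strip, PySem.Chars.lstrip, PySem.Chars.rstrip] using hs
    · exact List.dropWhile_idempotent _ _
  have h2 : List.dropWhile PySem.Chars.isspace (PySem.Chars.strip s).reverse
      = (PySem.Chars.strip s).reverse := by
    simp [PySem.Chars.strip, PySem.Chars.lstrip, PySem.Chars.rstrip, List.dropWhile_idempotent]
  conv_lhs => rw [PySem.Chars.strip, PySem.Chars.lstrip, PySem.Chars.rstrip, h1, h2,
    List.reverse_reverse]

theorem pvFindBoundA_cons (l : List Char) (t : List (List Char)) :
    pvFindBoundA (l :: t) = if pvIsB l then some 0 else (pvFindBoundA t).map (· + 1) := rfl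

theorem pvDtb_cons (l : List Char) (t : List (List Char)) :
    pvDtb (l :: t) = if pvIsB l then l :: t else pvDtb t := by
  unfold pvDtb
  rw [pvFindBoundA_cons]
  by_cases h : pvIsB l = true
  · simp [h]
  · cases pvFindBoundA t <;> simp [h]

theorem pvRep_cons_neg (h b l : List Char) (t : List (List Char))
    (hl : PySem.Chars.strip l ≠ "## ".toList ++ h) :
    pvReplaceSectionA h b (l :: t) = l :: pvReplaceSectionA h b t := by
  unfold pvReplaceSectionA
  rw [pvFindStartA, if_neg hl]
  cases hs : pvFindStartA ("## ".toList ++ h) t with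
  | none => simp
  | some s =>
    simp only [Option.map_some]
    have hd : (l :: t).drop (s + 1 + 1) = t.drop (s + 1) := by
      rw [show s + 1 + 1 = (s + 1) + 1 from rfl, List.drop_succ_cons]
    rw [hd]
    cases hb : pvFindBoundA (t.drop (s + 1)) with
    | none => simp [List.take_succ_cons]
    | some k =>
      simp only [List.take_succ_cons]
      rw [show s + 1 + 1 + k = (s + 1 + k) + 1 from by omega, List.drop_succ_cons]
      simp

theorem pvRep_cons_hdr (h b l : List Char) (t : List (List Char))
    (hl : PySem.Chars.strip l = "## ".toList ++ h) :
    pvReplaceSectionA h b (l :: t) = pvNewSecA h b ++ pvDtb t := by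
  unfold pvReplaceSectionA pvDtb
  rw [pvFindStartA, if_pos hl]
  cases hb : pvFindBoundA t with
  | none => simp [hb]
  | some k =>
    simp only [List.drop_succ_cons, List.drop_zero, hb,
      show (0:Nat) + 1 + k = k + 1 from by omega]
    simp

theorem pvRep_prefix (h b : List Char) (p r : List (List Char))
    (hp : ∀ l ∈ p, PySem.Chars.strip l ≠ "## ".toList ++ h) :
    pvReplaceSectionA h b (p ++ r) = p ++ pvReplaceSectionA h b r := by
  induction p with
  | nil => rfl
  | cons l t ih =>
    rw [List.cons_append, pvRep_cons_neg h b l _ (hp l (by simp)),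
      ih (fun l hl => hp l (by simp [hl]))]
    simp

-- rep1 commutes with drop-to-boundary (its inserted header line is itself a boundary)
theorem pvRep1_dtb_comm (c : List Char) (t : List (List Char)) :
    pvReplaceSectionA "Core Capabilities".toList c (pvDtb t)
      = pvDtb (pvReplaceSectionA "Core Capabilities".toList c t) := by
  induction t with
  | nil => rfl
  | cons l t ih =>
    by_cases h1 : PySem.Chars.strip l = "## ".toList ++ "Core Capabilities".toList
    · have hbl : pvIsB l = true := by simp only [pvIsB, h1]; decide
      rw [pvDtb_cons, if_pos hbl, pvRep_cons_hdr _ _ _ _ h1]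
      simp only [pvNewSecA, List.cons_append, pvDtb_cons]
      rw [if_pos (show pvIsB ("## ".toList ++ "Core Capabilities".toList ++ ['\n']) = true by decide)]
    · by_cases hbl : pvIsB l = true
      · rw [pvDtb_cons, if_pos hbl, pvRep_cons_neg _ _ _ _ h1, pvDtb_cons, if_pos hbl]
      · rw [pvDtb_cons, if_neg (by simp [hbl]), pvRep_cons_neg _ _ _ _ h1,
          pvDtb_cons, if_neg (by simp [hbl]), ih]

-- "what remains to be done" according to the flags, expressed with A's passes
def pvR (c g : List Char) (cd gd : Bool) (xs : List (List Char)) : List (List Char) :=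
  match cd, gd with
  | false, false => pvReplaceSectionA "Guarantees".toList g (pvReplaceSectionA "Core Capabilities".toList c xs)
  | true,  false => pvReplaceSectionA "Guarantees".toList g xs
  | false, true  => pvReplaceSectionA "Core Capabilities".toList c xs
  | true,  true  => xs

theorem pvGoB_cons (c g l : List Char) (t : List (List Char)) (cd gd sk : Bool) :
    pvGoB c g (l :: t) cd gd sk =
      (if sk && !(pvIsB l) then pvGoB c g t cd gd true
       else if PySem.Chars.strip l = "## Core Capabilities".toList && !cd then
         pvSecB (PySem.Chars.strip l) c ++ pvGoB c g t true gd true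
       else if PySem.Chars.strip l = "## Guarantees".toList && !gd then
         pvSecB (PySem.Chars.strip l) g ++ pvGoB c g t cd true true
       else l :: pvGoB c g t cd gd false) := rfl

theorem pvSec_eq_newSec (h s b : List Char) (hs : s = "## ".toList ++ h)
    (hb : PySem.Chars.strip b = b) : pvSecB s b = pvNewSecA h b := by
  simp [pvSecB, pvNewSecA, hs, hb]

-- the elements A inserts for Core are not Guarantees-header lines (given ¬cond_body)
theorem pvN1_free (c : List Char) (hc : PySem.Chars.strip c = c)
    (hne : PySem.Chars.strip (c ++ ['\n']) ≠ "## Guarantees".toList) :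
    ∀ l ∈ pvNewSecA "Core Capabilities".toList c,
      PySem.Chars.strip l ≠ "## ".toList ++ "Guarantees".toList := by
  intro l hl
  have hT : "## ".toList ++ "Guarantees".toList = "## Guarantees".toList := by decide
  rw [hT]
  simp only [pvNewSecA] at hl
  by_cases hce : c.isEmpty = true
  · rw [if_pos hce] at hl
    simp at hl
    rcases hl with h | h <;> rw [h] <;> decide
  · rw [if_neg hce] at hl
    simp at hl
    rcases hl with h | h | h | h
    · rw [h]; decide
    · rw [h]; decide
    · rw [h, hc]; exact hne
    · rw [h]; decide


theorem pv_strip_append_ws (x ws : List Char) (hws : ∀ c ∈ ws, PySem.Chars.isspace c = true) :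
    PySem.Chars.strip (x ++ ws) = PySem.Chars.strip x := by
  have hwsnil : List.dropWhile PySem.Chars.isspace ws = [] :=
    List.dropWhile_eq_nil_iff.mpr (fun c hc => hws c hc)
  have hrev : ∀ y : List Char, List.dropWhile PySem.Chars.isspace (ws.reverse ++ y) = List.dropWhile PySem.Chars.isspace y := by
    intro y
    rw [List.dropWhile_append]
    have : List.dropWhile PySem.Chars.isspace ws.reverse = [] :=
      List.dropWhile_eq_nil_iff.mpr (fun c hc => hws c (List.mem_reverse.mp hc))
    simp [this]
  simp only [PySem.Chars.strip, PySem.Chars.lstrip, PySem.Chars.rstrip]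
  rw [List.dropWhile_append]
  by_cases hx : (List.dropWhile PySem.Chars.isspace x).isEmpty = true
  · rw [if_pos hx, hwsnil]
    rw [List.isEmpty_iff] at hx
    rw [hx]
  · rw [if_neg hx, List.reverse_append, hrev]

set_option maxRecDepth 4096 in
theorem pvHasCoreHdr_bridge : ∀ (cur cs : List Char), pvHasCoreHdr cur cs = false →
    ∀ l ∈ pvLinesAux cur cs, PySem.Chars.strip l ≠ "## Core Capabilities".toList := by
  intro cur cs
  induction cur, cs using pvLinesAux.induct with
  | case1 acc he =>
    intro h l hl
    simp [pvLinesAux, he] at hl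
  | case2 acc he =>
    intro h l hl
    simp only [pvLinesAux, if_neg he] at hl
    simp at hl
    subst hl
    simpa [pvHasCoreHdr] using h
  | case3 acc t ih =>
    intro h l hl
    rw [pvHasCoreHdr, if_pos (by simp)] at h
    rw [Bool.or_eq_false_iff] at h
    simp only [pvLinesAux, List.mem_cons] at hl
    rcases hl with hl | hl
    · subst hl
      rw [pv_strip_append_ws acc.reverse ['\n'] (by intro c hc; fin_cases hc; decide)]
      simpa using h.1
    · exact ih h.2 l hl
  | case4 acc t ih =>
    intro h l hl
    rw [pvHasCoreHdr, if_pos (by simp)] at h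
    rw [Bool.or_eq_false_iff] at h
    have h2 := h.2
    rw [pvHasCoreHdr, if_pos (by simp)] at h2
    rw [Bool.or_eq_false_iff] at h2
    simp only [pvLinesAux, List.mem_cons] at hl
    rcases hl with hl | hl
    · subst hl
      rw [pv_strip_append_ws acc.reverse ['\r', '\n'] (by intro c hc; fin_cases hc <;> decide)]
      simpa using h.1
    · exact ih h2.2 l hl
  | case5 acc t hne ih =>
    intro h l hl
    rw [pvHasCoreHdr, if_pos (by simp)] at h
    rw [Bool.or_eq_false_iff] at h
    simp only [pvLinesAux, List.mem_cons] at hl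
    rcases hl with hl | hl
    · subst hl
      rw [pv_strip_append_ws acc.reverse ['\r'] (by intro c hc; fin_cases hc; decide)]
      simpa using h.1
    · exact ih h.2 l hl
  | case6 acc c t h1 h2 h3 ih =>
    intro h l hl
    rw [pvHasCoreHdr, if_neg (by rintro (rfl | rfl) <;> [exact h1 rfl; exact h3 rfl])] at h
    rw [pvLinesAux.eq_5 acc c t h1 h2 h3] at hl
    exact ih h l hl

-- the main invariant of B's single pass
theorem pvGoB_eq_pvR (c g : List Char) (hc : PySem.Chars.strip c = c)
    (hg : PySem.Chars.strip g = g) :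
    ∀ xs : List (List Char),
      (PySem.Chars.strip (c ++ ['\n']) ≠ "## Guarantees".toList
        ∨ ∀ l ∈ xs, PySem.Chars.strip l ≠ "## Core Capabilities".toList) →
      (∀ cd gd, pvGoB c g xs cd gd false = pvR c g cd gd xs)
      ∧ (∀ cd gd, pvGoB c g xs cd gd true = pvR c g cd gd (pvDtb xs)) := by
  intro xs
  induction xs with
  | nil =>
    intro _
    constructor <;> intro cd gd <;> cases cd <;> cases gd <;> rfl
  | cons l t ih =>
    intro hyp
    have hyp' : PySem.Chars.strip (c ++ ['\n']) ≠ "## Guarantees".toList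
        ∨ ∀ x ∈ t, PySem.Chars.strip x ≠ "## Core Capabilities".toList :=
      hyp.imp id (fun h x hx => h x (List.mem_cons_of_mem _ hx))
    obtain ⟨ihF, ihT⟩ := ih hyp'
    have hF : ∀ cd gd, pvGoB c g (l :: t) cd gd false = pvR c g cd gd (l :: t) := by
      intro cd gd
      rw [pvGoB_cons]
      rw [if_neg (by simp)]
      by_cases h1 : PySem.Chars.strip l = "## Core Capabilities".toList
      · -- a Core Capabilities header line
        have h1' : PySem.Chars.strip l = "## ".toList ++ "Core Capabilities".toList := by
          rw [h1]; decide
        have hne : PySem.Chars.strip (c ++ ['\n']) ≠ "## Guarantees".toList := by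
          rcases hyp with h | h
          · exact h
          · exact absurd h1 (h l (by simp))
        cases cd
        · rw [if_pos (by simp [h1]), ihT true gd,
            pvSec_eq_newSec "Core Capabilities".toList _ c h1' hc]
          cases gd
          · show _ = pvR c g false false (l :: t)
            unfold pvR
            rw [pvRep_cons_hdr _ _ _ _ h1', pvRep_prefix _ _ _ _ (pvN1_free c hc hne)]
          · show _ = pvR c g false true (l :: t)
            unfold pvR
            rw [pvRep_cons_hdr _ _ _ _ h1']
        · -- Core already done: the header line is copied
          have h2' : PySem.Chars.strip l ≠ "## Guarantees".toList := by rw [h1]; decide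
          have h2'' : PySem.Chars.strip l ≠ "## ".toList ++ "Guarantees".toList := by
            rw [h1]; decide
          rw [if_neg (by simp), if_neg (fun hx => h2' (of_decide_eq_true ((Bool.and_eq_true _ _).mp hx).1)), ihF true gd]
          cases gd
          · show _ = pvR c g true false (l :: t)
            unfold pvR
            rw [pvRep_cons_neg _ _ _ _ h2'']
          · rfl
      · by_cases h2 : PySem.Chars.strip l = "## Guarantees".toList
        · -- a Guarantees header line
          have h2' : PySem.Chars.strip l = "## ".toList ++ "Guarantees".toList := by
            rw [h2]; decide
          have h1'' : PySem.Chars.strip l ≠ "## ".toList ++ "Core Capabilities".toList := by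
            rw [h2]; decide
          rw [if_neg (fun hx => h1 (of_decide_eq_true ((Bool.and_eq_true _ _).mp hx).1))]
          cases gd
          · rw [if_pos ((Bool.and_eq_true _ _).mpr ⟨decide_eq_true h2, Bool.not_false⟩), ihT cd true,
              pvSec_eq_newSec "Guarantees".toList _ g h2' hg]
            cases cd
            · show _ = pvR c g false false (l :: t)
              unfold pvR
              rw [pvRep_cons_neg _ _ _ _ h1'', pvRep_cons_hdr _ _ _ _ h2',
                ← pvRep1_dtb_comm]
            · show _ = pvR c g true false (l :: t)
              unfold pvR
              rw [pvRep_cons_hdr _ _ _ _ h2']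
          · rw [if_neg (by simp), ihF cd true]
            cases cd
            · show _ = pvR c g false true (l :: t)
              unfold pvR
              rw [pvRep_cons_neg _ _ _ _ h1'']
            · rfl
        · -- an ordinary line: copied
          have h1'' : PySem.Chars.strip l ≠ "## ".toList ++ "Core Capabilities".toList := by
            intro he; exact h1 (by rw [he]; decide)
          have h2'' : PySem.Chars.strip l ≠ "## ".toList ++ "Guarantees".toList := by
            intro he; exact h2 (by rw [he]; decide)
          rw [if_neg (fun hx => h1 (of_decide_eq_true ((Bool.and_eq_true _ _).mp hx).1)),
            if_neg (fun hx => h2 (of_decide_eq_true ((Bool.and_eq_true _ _).mp hx).1)), ihF cd gd]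
          cases cd <;> cases gd <;> unfold pvR
          · rw [pvRep_cons_neg _ _ _ _ h1'', pvRep_cons_neg _ _ _ _ h2'']
          · rw [pvRep_cons_neg _ _ _ _ h1'']
          · rw [pvRep_cons_neg _ _ _ _ h2'']
          · rfl
    refine ⟨hF, ?_⟩
    intro cd gd
    by_cases hb : pvIsB l = true
    · have heq : pvGoB c g (l :: t) cd gd true = pvGoB c g (l :: t) cd gd false := by
        rw [pvGoB_cons, pvGoB_cons]
        simp [hb]
      rw [heq, hF cd gd, pvDtb_cons, if_pos hb]
    · rw [pvGoB_cons, if_pos (by simp [hb]), ihT cd gd, pvDtb_cons, if_neg (by simp [hb])]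

-- ===== VERDICT (by name: the statement is the Claim_ definition above) =====
theorem merge_vision_sections_spec : Claim_equal_merge_vision_sections := by
  intro original sections _ hPre
  show String.ofList (PySem.Chars.join []
      (pvReplaceSectionA "Guarantees".toList
        (PySem.Chars.strip (PySem.Dict.getD ⟨sections⟩ "guarantees_markdown" "").toList)
        (pvReplaceSectionA "Core Capabilities".toList
          (PySem.Chars.strip (PySem.Dict.getD ⟨sections⟩ "core_capabilities_markdown" "").toList)
          (pvLines original.toList))))
    = String.ofList (PySem.Chars.join []
      (pvGoB (PySem.Chars.strip (PySem.Dict.getD ⟨sections⟩ "core_capabilities_markdown" "").toList)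
        (PySem.Chars.strip (PySem.Dict.getD ⟨sections⟩ "guarantees_markdown" "").toList)
        (pvLines original.toList) false false false))
  set c := PySem.Chars.strip (PySem.Dict.getD ⟨sections⟩ "core_capabilities_markdown" "").toList with hcdef
  set g := PySem.Chars.strip (PySem.Dict.getD ⟨sections⟩ "guarantees_markdown" "").toList with hgdef
  have hc : PySem.Chars.strip c = c := by rw [hcdef]; exact pv_strip_idem _
  have hg : PySem.Chars.strip g = g := by rw [hgdef]; exact pv_strip_idem _
  have hyp : PySem.Chars.strip (c ++ ['\n']) ≠ "## Guarantees".toList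
      ∨ ∀ l ∈ pvLines original.toList, PySem.Chars.strip l ≠ "## Core Capabilities".toList := by
    by_cases h1 : PySem.Chars.strip (c ++ ['\n']) = "## Guarantees".toList
    · right
      -- the body condition transfers to Pre_'s find?-based phrasing
      have hceq : c = "## Guarantees".toList := by
        rw [← h1, pv_strip_append_ws c ['\n'] (by intro x hx; fin_cases hx; decide), hc]
      have hfirst : (sections.find? (fun p => p.1 == "core_capabilities_markdown")).any
          (fun p => PySem.Str.strip p.2 == "## Guarantees") = true := by
        have hun : PySem.Dict.getD (⟨sections⟩ : PySem.Dict String String) "core_capabilities_markdown" ""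
            = ((sections.find? (fun p => p.1 == "core_capabilities_markdown")).map Prod.snd).getD "" := rfl
        cases hf : sections.find? (fun p => p.1 == "core_capabilities_markdown") with
        | none =>
          exfalso
          rw [hcdef, hun, hf] at hceq
          exact absurd hceq (by decide)
        | some p =>
          rw [hcdef, hun, hf] at hceq
          simp only [Option.map_some, Option.getD_some] at hceq
          have : PySem.Str.strip p.2 = "## Guarantees" := by
            rw [← String.toList_inj]
            simpa using hceq
          simp [this]
      have hfalse : pvHasCoreHdr [] original.toList = false := by
        cases hh : pvHasCoreHdr [] original.toList
        · rfl
        · exact absurd ⟨hfirst, hh⟩ hPre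
      exact pvHasCoreHdr_bridge [] original.toList hfalse
    · left; exact h1
  obtain ⟨hF, -⟩ := pvGoB_eq_pvR c g hc hg (pvLines original.toList) hyp
  rw [hF false false]
  rfl
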